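-- pv_equiv track=rewrite | github.com/HITB-CyberWeek/proctf-2021 | services/cells/dev/service/srv/CellsGenerate.py | csum
-- ===== SOURCE A (Python) =====
-- def csum(s):
--     res = 0
--     for i in range(len(s)//4):
--         val = ord(s[4*i]) | (ord(s[4*i+1])<<8)  | (ord(s[4*i+2])<<16)  | (ord(s[4*i+3])<<24)
--         res ^=val
--     restsize = len(s)%4
--     if restsize == 0:
--         return res
--     elif restsize == 1:
--         return res ^ ord(s[-1])
--     elif restsize == 2:
--         return res ^ (ord(s[-2]) | (ord(s[-1]) << 8) )
--     elif restsize == 3: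
--         return res ^ (ord(s[-3]) | (ord(s[-2]) << 8) | (ord(s[-1]) << 16))
-- ===== SOURCE B (Python) =====
-- def csum(s):
--     res = 0
--     for i, c in enumerate(s):
--         res ^= ord(c) << (8 * (i % 4))
--     return res
-- ===== Notes on version B (the rewrite author's own statement) =====
-- stated objective: simpler
-- what changed: Replaced the word-assembling loop over len(s)//4 plus the three-way remainder switch by a single pass over enumerate(s) that XORs each character shifted by 8*(i%4), which subsumes all tail cases.
import Mathlib
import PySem

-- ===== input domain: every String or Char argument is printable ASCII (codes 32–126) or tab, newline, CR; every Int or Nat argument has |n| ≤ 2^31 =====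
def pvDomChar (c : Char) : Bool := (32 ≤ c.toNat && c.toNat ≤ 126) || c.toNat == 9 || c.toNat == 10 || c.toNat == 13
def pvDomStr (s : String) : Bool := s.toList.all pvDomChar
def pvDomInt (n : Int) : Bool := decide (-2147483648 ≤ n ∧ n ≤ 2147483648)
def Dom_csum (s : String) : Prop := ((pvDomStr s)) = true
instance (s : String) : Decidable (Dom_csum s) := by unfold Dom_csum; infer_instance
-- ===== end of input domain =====

-- B replaces A's 4-byte-word loop plus three-way tail switch by a single pass that XORs each
-- character shifted by 8*(i%4): a simpler decomposition, equal on the domain's ASCII strings.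

-- ===== PORT A =====
def csumOrd (l : List Char) (j : Int) : Int :=
  match PySem.List.pyGet? l j with
  | some c => (c.toNat : Int)
  | none => 0

def csum (s : String) : Int :=
  let l := s.toList
  let n : Int := (l.length : Int)
  let res : Int :=
    (PySem.List.pyRange 0 (PySem.Int.floordiv n 4) 1).foldl
      (fun res i =>
        let val := PySem.Int.bor (PySem.Int.bor (PySem.Int.bor
          (csumOrd l (4*i)) ((csumOrd l (4*i+1)) <<< 8)) ((csumOrd l (4*i+2)) <<< 16))
          ((csumOrd l (4*i+3)) <<< 24)
        PySem.Int.bxor res val) 0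
  let restsize := PySem.Int.mod n 4
  if restsize = 0 then res
  else if restsize = 1 then PySem.Int.bxor res (csumOrd l (-1))
  else if restsize = 2 then
    PySem.Int.bxor res (PySem.Int.bor (csumOrd l (-2)) ((csumOrd l (-1)) <<< 8))
  else
    PySem.Int.bxor res (PySem.Int.bor (PySem.Int.bor (csumOrd l (-3)) ((csumOrd l (-2)) <<< 8))
      ((csumOrd l (-1)) <<< 16))

-- ===== PORT B =====
def csum_alt (s : String) : Int :=
  (PySem.List.enumerate s.toList 0).foldl
    (fun res ic => PySem.Int.bxor res ((ic.2.toNat : Int) <<< (8 * (PySem.Int.mod ic.1 4)).toNat)) 0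

-- ===== PRECONDITION & SPEC =====
def Spec_csum (s : String) (out : Int) : Prop := out = csum_alt s
instance (s : String) (out : Int) : Decidable (Spec_csum s out) := by unfold Spec_csum; infer_instance

-- ===== CLAIM (what is proved, stated in full; the proofs are below) =====
def Claim_equal_csum : Prop := ∀ (s : String), Dom_csum s → Spec_csum s (csum s)

-- ===== LEMMAS AND PROOFS =====
theorem natCast_shiftLeft (m k : Nat) : ((m:Int) <<< k) = ((m <<< k : Nat) : Int) := by
  simp [Int.shiftLeft_eq, Nat.shiftLeft_eq]

theorem cast_shl8 (m : Nat) : ((m:Int) <<< (8:Int)) = ((m <<< 8 : Nat) : Int) :=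
  Int.shiftLeft_natCast m 8

theorem cast_shl16 (m : Nat) : ((m:Int) <<< (16:Int)) = ((m <<< 16 : Nat) : Int) :=
  Int.shiftLeft_natCast m 16

theorem cast_shl24 (m : Nat) : ((m:Int) <<< (24:Int)) = ((m <<< 24 : Nat) : Int) :=
  Int.shiftLeft_natCast m 24

def wN (a b c d : Char) : Nat :=
  a.toNat ||| b.toNat <<< 8 ||| c.toNat <<< 16 ||| d.toNat <<< 24

def R4 : List Char → Nat
  | a :: b :: c :: d :: t => wN a b c d ^^^ R4 t
  | [] => 0
  | [a] => a.toNat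
  | [a, b] => a.toNat ||| b.toNat <<< 8
  | [a, b, c] => a.toNat ||| b.toNat <<< 8 ||| c.toNat <<< 16

def ordN (l : List Char) (j : Int) : Nat :=
  match PySem.List.pyGet? l j with
  | some c => c.toNat
  | none => 0

theorem csumOrd_eq (l : List Char) (j : Int) : csumOrd l j = ((ordN l j : Nat) : Int) := by
  unfold csumOrd ordN; cases PySem.List.pyGet? l j <;> simp

def AchunkN (l : List Char) (i : Int) : Nat :=
  ordN l (4*i) ||| ordN l (4*i+1) <<< 8 ||| ordN l (4*i+2) <<< 16 ||| ordN l (4*i+3) <<< 24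

-- the Int-level chunk word of the port equals the Nat word

theorem Achunk_cast (l : List Char) (i : Int) :
    PySem.Int.bor (PySem.Int.bor (PySem.Int.bor
      (csumOrd l (4*i)) ((csumOrd l (4*i+1)) <<< 8)) ((csumOrd l (4*i+2)) <<< 16))
      ((csumOrd l (4*i+3)) <<< 24) = ((AchunkN l i : Nat) : Int) := by
  rw [csumOrd_eq, csumOrd_eq, csumOrd_eq, csumOrd_eq, cast_shl8, cast_shl16, cast_shl24,
    PySem.Int.bor_natCast, PySem.Int.bor_natCast, PySem.Int.bor_natCast]
  rfl

theorem foldl_bxor_cast {α : Type} (lst : List α) (g : α → Nat) (acc : Nat) :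
    lst.foldl (fun r x => PySem.Int.bxor r ((g x : Nat) : Int)) ((acc : Nat) : Int)
      = ((lst.foldl (fun r x => r ^^^ g x) acc : Nat) : Int) := by
  induction lst generalizing acc with
  | nil => rfl
  | cons h t ih => simp only [List.foldl_cons, PySem.Int.bxor_natCast]; exact ih _

theorem foldl_xor_init {α : Type} (lst : List α) (g : α → Nat) (acc : Nat) :
    lst.foldl (fun r x => r ^^^ g x) acc = acc ^^^ lst.foldl (fun r x => r ^^^ g x) 0 := by
  induction lst generalizing acc with
  | nil => simp
  | cons h t ih => simp only [List.foldl_cons, Nat.zero_xor]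
                   rw [ih (acc ^^^ g h), ih (g h), Nat.xor_assoc]

def AfoldN (l : List Char) : Nat :=
  (PySem.List.pyRange 0 ((l.length / 4 : Nat) : Int) 1).foldl (fun r i => r ^^^ AchunkN l i) 0

def AN (l : List Char) : Nat :=
  match l.length % 4 with
  | 0 => AfoldN l
  | 1 => AfoldN l ^^^ ordN l (-1)
  | 2 => AfoldN l ^^^ (ordN l (-2) ||| ordN l (-1) <<< 8)
  | _ => AfoldN l ^^^ (ordN l (-3) ||| ordN l (-2) <<< 8 ||| ordN l (-1) <<< 16)

theorem csum_eq_AN (s : String) : csum s = ((AN s.toList : Nat) : Int) := by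
  unfold csum
  set l := s.toList with hl
  simp only
  rw [show (4:Int) = ((4:Nat):Int) from rfl, PySem.Int.floordiv_natCast, PySem.Int.mod_natCast]
  simp only [Nat.cast_ofNat]
  have hfold : (PySem.List.pyRange 0 ((l.length / 4 : Nat) : Int) 1).foldl
      (fun res i =>
        PySem.Int.bxor res (PySem.Int.bor (PySem.Int.bor (PySem.Int.bor
          (csumOrd l (4*i)) ((csumOrd l (4*i+1)) <<< 8)) ((csumOrd l (4*i+2)) <<< 16))
          ((csumOrd l (4*i+3)) <<< 24))) 0 = ((AfoldN l : Nat) : Int) := by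
    unfold AfoldN
    rw [show (0:Int) = ((0:Nat):Int) from rfl]
    rw [← foldl_bxor_cast]
    apply PySem.List.foldl_congr_mem
    intro acc x _
    rw [Achunk_cast]
  rw [hfold]
  unfold AN
  generalize AfoldN l = F
  have h4 : l.length % 4 = 0 ∨ l.length % 4 = 1 ∨ l.length % 4 = 2 ∨ l.length % 4 = 3 := by omega
  rcases h4 with h | h | h | h
  all_goals rw [h]
  all_goals simp only [csumOrd_eq, cast_shl8, cast_shl16, PySem.Int.bor_natCast,
    PySem.Int.bxor_natCast]
  all_goals norm_num

theorem ordN_cons4 (a b c d : Char) (t : List Char) (n : Nat) (h : 4 ≤ n) :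
    ordN (a::b::c::d::t) (n : Int) = ordN t ((n - 4 : Nat) : Int) := by
  simp only [ordN, PySem.List.pyGet?_natCast]
  rw [show a::b::c::d::t = [a,b,c,d] ++ t from rfl,
    List.getElem?_append_right (by simp; omega)]
  simp

theorem ordN_neg_cons4 (a b c d : Char) (t : List Char) (j : Nat) (h1 : 0 < j)
    (h2 : j ≤ t.length) :
    ordN (a::b::c::d::t) (-(j : Int)) = ordN t (-(j : Int)) := by
  simp only [ordN]
  rw [PySem.List.pyGet?_neg_natCast _ j h1 (by simp; omega),
      PySem.List.pyGet?_neg_natCast t j h1 h2]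
  rw [show a::b::c::d::t = [a,b,c,d] ++ t from rfl,
      List.getElem?_append_right (by simp; omega)]
  congr 1
  congr 1
  simp
  omega

theorem ordN_zero (x : Char) (xs : List Char) : ordN (x::xs) 0 = x.toNat := by
  simp [ordN, PySem.List.pyGet?_zero_cons]

theorem ordN_cons_succ (x : Char) (xs : List Char) (n : Nat) :
    ordN (x::xs) ((n:Int)+1) = ordN xs n := by
  simp [ordN, PySem.List.pyGet?_cons_succ]

theorem Achunk_zero (a b c d : Char) (t : List Char) :
    AchunkN (a::b::c::d::t) 0 = wN a b c d := by
  unfold AchunkN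
  norm_num
  rw [show (1:Int) = ((0:Nat):Int)+1 from rfl, ordN_cons_succ,
      show (2:Int) = ((1:Nat):Int)+1 from rfl, ordN_cons_succ,
      show ((1:Nat):Int) = ((0:Nat):Int)+1 from rfl, ordN_cons_succ,
      show (3:Int) = ((2:Nat):Int)+1 from rfl, ordN_cons_succ,
      show ((2:Nat):Int) = ((1:Nat):Int)+1 from rfl, ordN_cons_succ,
      show ((1:Nat):Int) = ((0:Nat):Int)+1 from rfl, ordN_cons_succ,
      show ((0:Nat):Int) = (0:Int) from rfl,
      ordN_zero, ordN_zero, ordN_zero, ordN_zero]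
  rfl

theorem Achunk_shift (a b c d : Char) (t : List Char) (k : Nat) :
    AchunkN (a::b::c::d::t) ((k : Int) + 1) = AchunkN t (k : Int) := by
  unfold AchunkN
  rw [show (4:Int) * ((k:Int)+1) = ((4*k+4 : Nat) : Int) by push_cast; ring,
      show ((4*k+4 : Nat) : Int) + 1 = ((4*k+5 : Nat) : Int) by push_cast; ring,
      show ((4*k+4 : Nat) : Int) + 2 = ((4*k+6 : Nat) : Int) by push_cast; ring,
      show ((4*k+4 : Nat) : Int) + 3 = ((4*k+7 : Nat) : Int) by push_cast; ring,
      ordN_cons4 _ _ _ _ _ _ (by omega), ordN_cons4 _ _ _ _ _ _ (by omega),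
      ordN_cons4 _ _ _ _ _ _ (by omega), ordN_cons4 _ _ _ _ _ _ (by omega)]
  rw [show (4:Int) * (k:Int) = ((4*k : Nat) : Int) by push_cast; ring,
      show ((4*k : Nat) : Int) + 1 = ((4*k+1 : Nat) : Int) by push_cast; ring,
      show ((4*k : Nat) : Int) + 2 = ((4*k+2 : Nat) : Int) by push_cast; ring,
      show ((4*k : Nat) : Int) + 3 = ((4*k+3 : Nat) : Int) by push_cast; ring]
  congr 4

theorem AfoldN_cons4 (a b c d : Char) (t : List Char) :
    AfoldN (a::b::c::d::t) = wN a b c d ^^^ AfoldN t := by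
  unfold AfoldN
  have hlen : ((a::b::c::d::t).length / 4 : Nat) = t.length / 4 + 1 := by simp; omega
  rw [hlen]
  rw [PySem.List.pyRange_one_cons (by positivity)]
  rw [List.foldl_cons]
  rw [show (0 ^^^ AchunkN (a::b::c::d::t) 0) = wN a b c d by
    rw [Nat.zero_xor, Achunk_zero]]
  rw [show ((0:Int)+1) = (1:Int) from rfl]
  rw [PySem.List.pyRange_one (a := 1), PySem.List.pyRange_one (a := 0)]
  rw [show (((t.length / 4 + 1 : Nat) : Int) - 1).toNat = t.length / 4 by push_cast; omega,
      show (((t.length / 4 : Nat) : Int) - 0).toNat = t.length / 4 by push_cast; omega]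
  rw [List.foldl_map, List.foldl_map]
  rw [foldl_xor_init _ _ (wN a b c d)]
  congr 1
  apply PySem.List.foldl_congr_mem
  intro acc k _
  rw [show (1:Int) + (k:Int) = (k:Int) + 1 by ring, Achunk_shift,
      show (0:Int) + (k:Int) = (k:Int) by ring]

theorem AfoldN_short (l : List Char) (h : l.length < 4) : AfoldN l = 0 := by
  unfold AfoldN
  rw [show ((l.length / 4 : Nat) : Int) = 0 by rw [Nat.div_eq_of_lt h]; rfl]
  rw [PySem.List.pyRange_one_eq_nil (by omega)]
  rfl

theorem AN_cons4 (a b c d : Char) (t : List Char) :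
    AN (a::b::c::d::t) = wN a b c d ^^^ AN t := by
  unfold AN
  have hm : (a::b::c::d::t).length % 4 = t.length % 4 := by simp; omega
  rw [hm]
  have h4 : t.length % 4 = 0 ∨ t.length % 4 = 1 ∨ t.length % 4 = 2 ∨ t.length % 4 = 3 := by
    omega
  rcases h4 with h | h | h | h <;> rw [h] <;> simp only []
  · rw [AfoldN_cons4]
  · rw [AfoldN_cons4,
      show (-1 : Int) = -((1:Nat):Int) from rfl,
      ordN_neg_cons4 _ _ _ _ _ _ (by omega) (by omega), Nat.xor_assoc]
  · rw [AfoldN_cons4,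
      show (-1 : Int) = -((1:Nat):Int) from rfl, show (-2 : Int) = -((2:Nat):Int) from rfl,
      ordN_neg_cons4 _ _ _ _ _ _ (by omega) (by omega),
      ordN_neg_cons4 _ _ _ _ _ _ (by omega) (by omega), Nat.xor_assoc]
  · rw [AfoldN_cons4,
      show (-1 : Int) = -((1:Nat):Int) from rfl, show (-2 : Int) = -((2:Nat):Int) from rfl,
      show (-3 : Int) = -((3:Nat):Int) from rfl,
      ordN_neg_cons4 _ _ _ _ _ _ (by omega) (by omega),
      ordN_neg_cons4 _ _ _ _ _ _ (by omega) (by omega),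
      ordN_neg_cons4 _ _ _ _ _ _ (by omega) (by omega), Nat.xor_assoc]

theorem AN_nil : AN [] = 0 := by
  unfold AN
  simp [AfoldN_short]

theorem AN_one (a : Char) : AN [a] = a.toNat := by
  unfold AN
  simp only [List.length_singleton]
  rw [AfoldN_short _ (by simp)]
  simp [ordN, PySem.List.pyGet?_neg_one]

theorem AN_two (a b : Char) : AN [a, b] = (a.toNat ||| b.toNat <<< 8) := by
  unfold AN
  rw [show ([a,b] : List Char).length % 4 = 2 from rfl]
  rw [AfoldN_short _ (by simp)]
  simp only [ordN]
  rw [show (-1 : Int) = -((1:Nat):Int) from rfl,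
    PySem.List.pyGet?_neg_natCast [a,b] 1 (by omega) (by simp)]
  rw [show (-2 : Int) = -((2:Nat):Int) from rfl,
    PySem.List.pyGet?_neg_natCast [a,b] 2 (by omega) (by simp)]
  simp

theorem AN_three (a b c : Char) :
    AN [a, b, c] = (a.toNat ||| b.toNat <<< 8 ||| c.toNat <<< 16) := by
  unfold AN
  rw [show ([a,b,c] : List Char).length % 4 = 3 from rfl]
  rw [AfoldN_short _ (by simp)]
  simp only [ordN]
  rw [show (-1 : Int) = -((1:Nat):Int) from rfl,
    PySem.List.pyGet?_neg_natCast [a,b,c] 1 (by omega) (by simp)]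
  rw [show (-2 : Int) = -((2:Nat):Int) from rfl,
    PySem.List.pyGet?_neg_natCast [a,b,c] 2 (by omega) (by simp)]
  rw [show (-3 : Int) = -((3:Nat):Int) from rfl,
    PySem.List.pyGet?_neg_natCast [a,b,c] 3 (by omega) (by simp)]
  simp

theorem AN_eq_R4 : ∀ l : List Char, AN l = R4 l
  | a :: b :: c :: d :: t => by rw [AN_cons4, AN_eq_R4 t]; rfl
  | [] => by rw [AN_nil]; rfl
  | [a] => by rw [AN_one]; rfl
  | [a, b] => by rw [AN_two]; rfl
  | [a, b, c] => by rw [AN_three]; rfl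

theorem or_eq_xor_of_lt (x y k : Nat) (hx : x < 2^k) : x ||| (y <<< k) = x ^^^ (y <<< k) := by
  apply Nat.eq_of_testBit_eq
  intro i
  simp [Nat.testBit_or, Nat.testBit_xor, Nat.testBit_shiftLeft]
  by_cases h : k ≤ i
  · have : x.testBit i = false :=
      Nat.testBit_lt_two_pow (lt_of_lt_of_le hx (Nat.pow_le_pow_right (by norm_num) h))
    simp [this]
  · simp [h]

-- one enumerate/fold step of B, with the shift amount computed

theorem B_step (c : Char) (rest : List Char) (m : Nat) (acc : Nat) :
    (PySem.List.enumerate (c :: rest) ((m : Nat) : Int)).foldl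
      (fun res ic => PySem.Int.bxor res ((ic.2.toNat : Int) <<< (8 * (PySem.Int.mod ic.1 4)).toNat)) ((acc : Nat) : Int)
    = (PySem.List.enumerate rest ((m + 1 : Nat) : Int)).foldl
      (fun res ic => PySem.Int.bxor res ((ic.2.toNat : Int) <<< (8 * (PySem.Int.mod ic.1 4)).toNat))
      ((acc ^^^ c.toNat <<< (8 * (m % 4)) : Nat) : Int) := by
  rw [PySem.List.enumerate_cons, List.foldl_cons]
  congr 1
  · rw [show (4:Int) = ((4:Nat):Int) from rfl, PySem.Int.mod_natCast]
    rw [show (8 * ((m % 4 : Nat) : Int)).toNat = 8 * (m % 4) by push_cast; omega]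
    rw [natCast_shiftLeft, PySem.Int.bxor_natCast]

theorem shl_lt (y : Nat) (a b : Nat) (hy : y < 2^a) : y <<< b < 2^(a+b) := by
  rw [Nat.shiftLeft_eq, Nat.pow_add]
  exact Nat.mul_lt_mul_of_lt_of_le hy (le_refl _) (by positivity)

theorem xor_word2 (x y : Nat) (hx : x < 256) :
    x ^^^ y <<< 8 = x ||| y <<< 8 :=
  (or_eq_xor_of_lt x y 8 (by norm_num at hx ⊢; omega)).symm

theorem xor_word3 (x y z : Nat) (hx : x < 256) (hy : y < 256) :
    x ^^^ y <<< 8 ^^^ z <<< 16 = x ||| y <<< 8 ||| z <<< 16 := by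
  have h1 : x ||| y <<< 8 < 2^16 :=
    Nat.or_lt_two_pow (by norm_num; omega) (by have := shl_lt y 8 8 (by norm_num; omega); norm_num at this ⊢; omega)
  rw [xor_word2 x y hx, or_eq_xor_of_lt _ z 16 h1]

theorem xor_word4 (x y z w : Nat) (hx : x < 256) (hy : y < 256) (hz : z < 256) :
    x ^^^ y <<< 8 ^^^ z <<< 16 ^^^ w <<< 24 = x ||| y <<< 8 ||| z <<< 16 ||| w <<< 24 := by
  have h1 : x ||| y <<< 8 < 2^16 :=
    Nat.or_lt_two_pow (by norm_num; omega) (by have := shl_lt y 8 8 (by norm_num; omega); norm_num at this ⊢; omega)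
  have h2 : x ||| y <<< 8 ||| z <<< 16 < 2^24 :=
    Nat.or_lt_two_pow (by norm_num at h1 ⊢; omega) (by have := shl_lt z 8 16 (by norm_num; omega); norm_num at this ⊢; omega)
  rw [xor_word3 x y z hx hy, or_eq_xor_of_lt _ w 24 h2]

theorem B_loop : ∀ (l : List Char), (∀ c ∈ l, c.toNat < 256) → ∀ (k acc : Nat),
    (PySem.List.enumerate l ((4*k : Nat) : Int)).foldl
      (fun res ic => PySem.Int.bxor res ((ic.2.toNat : Int) <<< (8 * (PySem.Int.mod ic.1 4)).toNat))
      ((acc : Nat) : Int)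
    = ((acc ^^^ R4 l : Nat) : Int)
  | [], _, k, acc => by simp [PySem.List.enumerate_nil, R4]
  | [a], hb, k, acc => by
    rw [B_step, PySem.List.enumerate_nil]
    rw [show (4*k) % 4 = 0 by omega]
    simp only [List.foldl_nil, Nat.mul_zero, Nat.shiftLeft_zero]
    rfl
  | [a, b], hb, k, acc => by
    rw [B_step, B_step, PySem.List.enumerate_nil]
    rw [show (4*k) % 4 = 0 by omega, show (4*k+1) % 4 = 1 by omega]
    simp only [List.foldl_nil, Nat.mul_zero, Nat.mul_one, Nat.shiftLeft_zero]
    rw [Nat.xor_assoc, xor_word2 _ _ (hb a (by simp))]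
    rfl
  | [a, b, c], hb, k, acc => by
    rw [B_step, B_step, B_step, PySem.List.enumerate_nil]
    rw [show (4*k) % 4 = 0 by omega, show (4*k+1) % 4 = 1 by omega,
        show (4*k+1+1) % 4 = 2 by omega]
    simp only [List.foldl_nil, Nat.mul_zero, Nat.mul_one, Nat.shiftLeft_zero]
    rw [Nat.xor_assoc, Nat.xor_assoc, ← Nat.xor_assoc a.toNat,
      xor_word3 _ _ _ (hb a (by simp)) (hb b (by simp))]
    rfl
  | a :: b :: c :: d :: t, hb, k, acc => by
    rw [B_step, B_step, B_step, B_step]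
    rw [show (4*k) % 4 = 0 by omega, show (4*k+1) % 4 = 1 by omega,
        show (4*k+1+1) % 4 = 2 by omega, show (4*k+1+1+1) % 4 = 3 by omega]
    rw [show (4*k+1+1+1+1) = 4*(k+1) by ring]
    rw [B_loop t (fun x hx => hb x (by simp [hx])) (k+1) _]
    simp only [Nat.mul_zero, Nat.mul_one, Nat.shiftLeft_zero]
    rw [show (8*2) = 16 from rfl, show (8*3) = 24 from rfl]
    rw [Nat.xor_assoc acc, Nat.xor_assoc acc, Nat.xor_assoc acc,
      xor_word4 _ _ _ _ (hb a (by simp)) (hb b (by simp)) (hb c (by simp))]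
    rw [show R4 (a :: b :: c :: d :: t) = wN a b c d ^^^ R4 t from rfl,
      Nat.xor_assoc]
    rfl

theorem csum_alt_eq_R4 (s : String) (h : Dom_csum s) :
    csum_alt s = ((R4 s.toList : Nat) : Int) := by
  have hb : ∀ c ∈ s.toList, c.toNat < 256 := by
    intro c hc
    have := List.all_eq_true.mp h c hc
    simp [pvDomChar] at this
    omega
  unfold csum_alt
  exact (B_loop s.toList hb 0 0).trans (by rw [Nat.zero_xor])

-- ===== VERDICT (by name: the statement is the Claim_ definition above) =====
theorem csum_spec : Claim_equal_csum := by
  intro s h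
  unfold Spec_csum
  rw [csum_eq_AN, AN_eq_R4, csum_alt_eq_R4 s h]
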